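-- pv_equiv track=rewrite | github.com/servaltullius/mo2-path-wizard | src/mo2_path_wizard/patcher.py | _replace_path_prefix
-- ===== SOURCE A (Python) =====
-- _PATH_REPLACEMENT_BOUNDARY_CHARS = frozenset('/\\"\'()[]{}<>,;')
--
-- def _has_path_replacement_boundary(value: str, index: int) -> bool:
--     if index >= len(value):
--         return True
--     ch = value[index]
--     return ch in _PATH_REPLACEMENT_BOUNDARY_CHARS or ch.isspace()
--
-- def _replace_path_prefix(value: str, old: str, new: str) -> str:
--     if not old:
--         return value
--
--     parts: list[str] = []
--     start = 0
--     pos = value.find(old, start)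
--     while pos != -1:
--         end = pos + len(old)
--         if _has_path_replacement_boundary(value, end):
--             parts.append(value[start:pos])
--             parts.append(new)
--         else:
--             parts.append(value[start:end])
--         start = end
--         pos = value.find(old, start)
--
--     if not parts:
--         return value
--
--     parts.append(value[start:])
--     return "".join(parts)
-- ===== SOURCE B (Python) =====
-- _PATH_REPLACEMENT_BOUNDARY_CHARS = frozenset('/\\"\'()[]{}<>,;')
--
--
-- def _is_boundary_char(ch: str) -> bool:
--     return ch in _PATH_REPLACEMENT_BOUNDARY_CHARS or ch.isspace()
--
--
-- def _replace_path_prefix(value: str, old: str, new: str) -> str: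
--     # Single char-by-char pass: at each position either consume a match of
--     # `old` (emitting `new` or `old` depending on the boundary after it) or
--     # copy one character.
--     if not old:
--         return value
--     out = []
--     i = 0
--     n = len(value)
--     L = len(old)
--     while i < n:
--         if value.startswith(old, i):
--             j = i + L
--             if j >= n or _is_boundary_char(value[j]):
--                 out.append(new)
--             else:
--                 out.append(old)
--             i = j
--         else:
--             out.append(value[i])
--             i += 1
--     return "".join(out)
-- ===== Notes on version B (the rewrite author's own statement) =====
-- stated objective: alternative
-- what changed: A scans with repeated value.find(old, start) jumps and accumulates slice parts; B makes a single left-to-right character pass that tests a prefix match at each position and emits new/old/the current character, with no find calls and no slicing.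
import Mathlib
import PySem

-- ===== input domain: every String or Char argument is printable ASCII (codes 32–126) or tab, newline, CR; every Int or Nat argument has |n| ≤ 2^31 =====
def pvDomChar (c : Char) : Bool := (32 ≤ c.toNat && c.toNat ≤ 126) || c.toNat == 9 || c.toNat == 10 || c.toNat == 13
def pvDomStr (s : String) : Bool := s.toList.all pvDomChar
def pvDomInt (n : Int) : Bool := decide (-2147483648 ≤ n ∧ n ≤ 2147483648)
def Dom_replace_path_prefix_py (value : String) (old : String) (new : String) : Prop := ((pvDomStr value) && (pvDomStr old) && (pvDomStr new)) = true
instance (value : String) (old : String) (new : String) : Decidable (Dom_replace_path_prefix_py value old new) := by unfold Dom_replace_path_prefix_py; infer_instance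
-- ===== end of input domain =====

-- B replaces A's find-jump loop over occurrence positions by a single char-by-char
-- scan that tests a prefix match at each position (objective: alternative decomposition).

-- shared constant: _PATH_REPLACEMENT_BOUNDARY_CHARS
def pv_boundary_chars : List Char := ['/', '\\', '"', '\'', '(', ')', '[', ']', '{', '}', '<', '>', ',', ';']

-- ===== PORT A =====
-- _has_path_replacement_boundary(value, index)
def has_path_replacement_boundary (value : List Char) (index : Nat) : Bool :=
  if value.length ≤ index then true
  else
    match value[index]? with
    | none => true   -- unreachable under the guard; kept for totality
    | some ch => pv_boundary_chars.contains ch || PySem.Chars.isspace ch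

-- the while-loop of _replace_path_prefix: state (parts, start); fuel makes it total
-- (fuel = len(value)+1 always suffices, proved below)
def loopA (value old new : List Char) : Nat → List (List Char) → Nat → List (List Char) × Nat
  | 0, parts, start => (parts, start)
  | fuel + 1, parts, start =>
    let pos := PySem.Chars.findFrom value old (start : Int) none
    if pos = -1 then (parts, start)
    else
      let e := pos.toNat + old.length
      if has_path_replacement_boundary value e then
        loopA value old new fuel
          (parts ++ [PySem.List.slice value (some (start : Int)) (some pos), new]) e
      else
        loopA value old new fuel
          (parts ++ [PySem.List.slice value (some (start : Int)) (some (e : Int))]) e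

def replace_path_prefix_py (value : String) (old : String) (new : String) : String :=
  if old = "" then value
  else
    let r := loopA value.toList old.toList new.toList (value.toList.length + 1) [] 0
    if r.1 = [] then value
    else String.ofList ((r.1 ++ [value.toList.drop r.2]).flatten)

-- ===== PORT B =====
def pv_is_boundary_char (ch : Char) : Bool :=
  pv_boundary_chars.contains ch || PySem.Chars.isspace ch

-- one left-to-right pass: consume a match of `old` (emitting `new` or `old`
-- by the boundary after it) or copy one character
def walkB (old new : List Char) : List Char → List Char
  | [] => []
  | c :: rest =>
    if old.isPrefixOf (c :: rest) then
      let restAfter := rest.drop (old.length - 1)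
      (match restAfter with
       | [] => new
       | ch :: _ => if pv_is_boundary_char ch then new else old) ++ walkB old new restAfter
    else
      c :: walkB old new rest
  termination_by cs => cs.length
  decreasing_by
  all_goals simp only [List.length_drop, List.length_cons]; omega

def replace_path_prefix_py_alt (value : String) (old : String) (new : String) : String :=
  if old = "" then value
  else String.ofList (walkB old.toList new.toList value.toList)

-- ===== PRECONDITION & SPEC =====
def Spec_replace_path_prefix_py (value : String) (old : String) (new : String) (out : String) : Prop := out = replace_path_prefix_py_alt value old new
instance (value : String) (old : String) (new : String) (out : String) : Decidable (Spec_replace_path_prefix_py value old new out) := by unfold Spec_replace_path_prefix_py; infer_instance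

-- ===== CLAIM (what is proved, stated in full; the proofs are below) =====
def Claim_equal_replace_path_prefix_py : Prop := ∀ (value : String) (old : String) (new : String), Dom_replace_path_prefix_py value old new → Spec_replace_path_prefix_py value old new (replace_path_prefix_py value old new)

-- ===== LEMMAS AND PROOFS =====

-- walkB steps over one non-matching character
theorem walkB_cons_of_not_prefix (old new : List Char) (c : Char) (rest : List Char)
    (h : ¬ old <+: c :: rest) :
    walkB old new (c :: rest) = c :: walkB old new rest := by
  rw [walkB]
  simp [List.isPrefixOf_iff_prefix, h]

-- walkB consumes a match at the head
theorem walkB_of_prefix (old new cs : List Char) (hold : old ≠ []) (h : old <+: cs) :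
    walkB old new cs =
      (match cs.drop old.length with
       | [] => new
       | ch :: _ => if pv_is_boundary_char ch then new else old) ++ walkB old new (cs.drop old.length) := by
  match cs, h with
  | [], h => exact absurd (List.prefix_nil.mp h) hold
  | c :: rest, h =>
    have hL : 1 ≤ old.length := List.length_pos_iff.mpr hold
    have hdrop : rest.drop (old.length - 1) = (c :: rest).drop old.length := by
      obtain ⟨m, hm⟩ : ∃ m, old.length = m + 1 := ⟨old.length - 1, by omega⟩
      simp [hm]
    rw [walkB]
    simp only [List.isPrefixOf_iff_prefix, h, if_true, hdrop]

-- no occurrence of old anywhere in cs ⇒ walkB copies cs unchanged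
theorem walkB_no_occ (old new : List Char) :
    ∀ cs : List Char, ¬ old <:+: cs → walkB old new cs = cs := by
  intro cs
  induction cs with
  | nil => intro _; rw [walkB]
  | cons c rest ih =>
    intro h
    have hp : ¬ old <+: c :: rest := fun hp => h hp.isInfix
    rw [walkB_cons_of_not_prefix old new c rest hp, ih]
    intro hi
    exact h (hi.trans (List.suffix_cons c rest).isInfix)

-- no match in the first k positions ⇒ walkB copies k characters
theorem walkB_skip (old new : List Char) :
    ∀ (k : Nat) (cs : List Char), k ≤ cs.length → (∀ i < k, ¬ old <+: cs.drop i) →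
      walkB old new cs = cs.take k ++ walkB old new (cs.drop k) := by
  intro k
  induction k with
  | zero => intro cs _ _; simp
  | succ k ih =>
    intro cs hk h
    match cs with
    | [] => simp at hk
    | c :: rest =>
      have h0 : ¬ old <+: c :: rest := by simpa using h 0 (Nat.succ_pos k)
      rw [walkB_cons_of_not_prefix old new c rest h0]
      rw [ih rest (by simpa using hk) (fun i hi => by simpa using h (i + 1) (by omega))]
      simp

-- A's boundary test agrees with B's head-of-suffix test
theorem boundary_eq (value : List Char) (e : Nat) :
    has_path_replacement_boundary value e =
      (match value.drop e with
       | [] => true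
       | ch :: _ => pv_is_boundary_char ch) := by
  unfold has_path_replacement_boundary pv_is_boundary_char
  by_cases hle : value.length ≤ e
  · simp [hle, List.drop_eq_nil_of_le hle]
  · have hne : value.drop e ≠ [] := by
      simp [List.drop_eq_nil_iff]; omega
    match hd : value.drop e with
    | [] => exact absurd hd hne
    | ch :: tl =>
      have : value[e]? = some ch := by
        rw [← List.head?_drop, hd]; rfl
      simp [hle, this]

-- if the loop produced no parts, nothing was consumed
theorem loopA_nil (value old new : List Char) :
    ∀ (fuel : Nat) (parts : List (List Char)) (start : Nat),
      (loopA value old new fuel parts start).1 = [] →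
      parts = [] ∧ (loopA value old new fuel parts start).2 = start := by
  intro fuel
  induction fuel with
  | zero => intro parts start h; refine ⟨h, ?_⟩; rw [loopA]
  | succ fuel ih =>
    intro parts start h
    rw [loopA] at h ⊢
    by_cases hpos : PySem.Chars.findFrom value old (start : Int) none = -1
    · simp only [hpos, if_pos] at h ⊢
      exact ⟨h, trivial⟩
    · simp only [hpos, if_false] at h ⊢
      by_cases hb : has_path_replacement_boundary value
          ((PySem.Chars.findFrom value old (start : Int) none).toNat + old.length)
      · simp only [hb, if_pos] at h ⊢
        have := (ih _ _ h).1
        simp at this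
      · simp only [hb, Bool.false_eq_true, if_false] at h ⊢
        have := (ih _ _ h).1
        simp at this

-- main invariant: the loop's assembled output equals parts.flatten ++ walkB of the unread suffix
theorem loopA_eq (value old new : List Char) (hold : old ≠ []) :
    ∀ (fuel : Nat) (start : Nat) (parts : List (List Char)),
      start ≤ value.length → value.length - start < fuel →
      (loopA value old new fuel parts start).1.flatten
          ++ value.drop (loopA value old new fuel parts start).2
        = parts.flatten ++ walkB old new (value.drop start) := by
  intro fuel
  induction fuel with
  | zero => intro start parts _ hf; omega
  | succ fuel ih =>
    intro start parts hs hf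
    rw [loopA]
    by_cases hpos : PySem.Chars.findFrom value old (start : Int) none = -1
    · simp only [hpos, if_pos]
      have hno : ¬ old <:+: value.drop start :=
        (PySem.Chars.findFrom_natCast_eq_neg_one_iff value old start hs).mp hpos
      rw [walkB_no_occ old new _ hno]
    · obtain ⟨hkle, hpre, hmin⟩ :=
        PySem.Chars.findFrom_natCast_spec value old start hs hpos
      have hpos0 : 0 ≤ PySem.Chars.findFrom value old (start : Int) none :=
        le_trans (by exact_mod_cast Nat.zero_le start) hkle
      obtain ⟨p, hp⟩ : ∃ p : Nat, PySem.Chars.findFrom value old (start : Int) none = (p : Int) :=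
        ⟨_, (Int.toNat_of_nonneg hpos0).symm⟩
      rw [hp] at hkle
      simp only [hp, Int.toNat_natCast] at hpre hmin ⊢
      have hsp : start ≤ p := by exact_mod_cast hkle
      have hposn : ((p : Int)) ≠ -1 := by omega
      rw [if_neg hposn]
      have hL : 1 ≤ old.length := List.length_pos_iff.mpr hold
      have hple : p ≤ value.length := by
        by_contra hc
        rw [List.drop_eq_nil_of_le (by omega)] at hpre
        exact hold (List.prefix_nil.mp hpre)
      have hLlen : old.length ≤ value.length - p := by
        have := hpre.length_le
        simpa using this
      have helen : p + old.length ≤ value.length := by omega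
      -- walkB over the suffix: skip to p, then one match step
      have hskip : walkB old new (value.drop start)
          = (value.drop start).take (p - start) ++ walkB old new (value.drop p) := by
        rw [walkB_skip old new (p - start) (value.drop start) (by simp; omega)
          (fun i hi => by
            rw [List.drop_drop]
            have := hmin (i + start) (by omega) (by omega)
            rwa [Nat.add_comm start i])]
        rw [List.drop_drop]
        have harg : start + (p - start) = p := by omega
        rw [harg]
      have hmatch := walkB_of_prefix old new (value.drop p) hold hpre
      rw [List.drop_drop] at hmatch
      have hs2 : p + old.length ≤ value.length := helen
      have hf2 : value.length - (p + old.length) < fuel := by omega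
      by_cases hb : has_path_replacement_boundary value (p + old.length)
      · rw [if_pos hb]
        rw [ih (p + old.length) _ hs2 hf2]
        rw [hskip, hmatch]
        rw [boundary_eq value (p + old.length)] at hb
        have htok : (match value.drop (p + old.length) with
            | [] => new
            | ch :: _ => if pv_is_boundary_char ch then new else old) = new := by
          match hd : value.drop (p + old.length) with
          | [] => rfl
          | ch :: tl =>
            rw [hd] at hb
            simp only at hb
            simp [hb]
        rw [htok, PySem.List.slice_natCast]
        simp [List.append_assoc]
      · rw [if_neg hb]
        rw [ih (p + old.length) _ hs2 hf2]
        rw [hskip, hmatch]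
        rw [boundary_eq value (p + old.length)] at hb
        have htok : (match value.drop (p + old.length) with
            | [] => new
            | ch :: _ => if pv_is_boundary_char ch then new else old) = old := by
          match hd : value.drop (p + old.length) with
          | [] => rw [hd] at hb; simp at hb
          | ch :: tl =>
            rw [hd] at hb
            simp only at hb
            simp at hb
            simp [hb]
        rw [htok, PySem.List.slice_natCast]
        have hsliceE : (value.drop start).take (p + old.length - start)
            = (value.drop start).take (p - start) ++ old := by
          have hsplit : p + old.length - start = (p - start) + old.length := by omega
          rw [hsplit, List.take_add, List.drop_drop]
          have h2 : start + (p - start) = p := by omega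
          rw [h2]
          congr 1
          exact (List.prefix_iff_eq_take.mp hpre).symm
        rw [hsliceE]
        simp [List.append_assoc]

-- ===== VERDICT (by name: the statement is the Claim_ definition above) =====
theorem replace_path_prefix_py_spec : Claim_equal_replace_path_prefix_py := by
  intro value old new _
  unfold Spec_replace_path_prefix_py replace_path_prefix_py replace_path_prefix_py_alt
  by_cases hold : old = ""
  · simp [hold]
  · simp only [hold, if_false]
    have holdl : old.toList ≠ [] := by
      intro h
      exact hold (by simpa using congrArg String.ofList h)
    have hmain := loopA_eq value.toList old.toList new.toList holdl
      (value.toList.length + 1) 0 [] (Nat.zero_le _) (by omega)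
    simp only [List.flatten_nil, List.nil_append, List.drop_zero] at hmain
    set r := loopA value.toList old.toList new.toList (value.toList.length + 1) [] 0 with hr
    by_cases hnil : r.1 = []
    · have hstart := (loopA_nil value.toList old.toList new.toList _ [] 0 hnil).2
      rw [← hr] at hstart
      rw [hnil, hstart] at hmain
      simp only [List.flatten_nil, List.nil_append, List.drop_zero] at hmain
      simp [hnil, ← hmain]
    · simp only [hnil, if_false]
      rw [← hmain]
      simp
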